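-- pv_equiv track=rewrite | github.com/Anshuman-UCSB/Advent-Of-Code | 2017/python/day4/main.py | day4
-- ===== SOURCE A (Python) =====
-- def day4(input):
-- 	def valid1(l):
-- 		spl = l.split()
-- 		return len(spl) == len(set(spl))
-- 	def valid2(l):
-- 		spl = l.split()
-- 		return len(spl) == len(set(map(tuple,map(sorted,spl))))
-- 	return [sum(valid1(l) for l in input.splitlines()),
-- 			sum(valid2(l) for l in input.splitlines())]
-- ===== SOURCE B (Python) =====
-- def day4(input):
--     c1 = c2 = 0
--     for line in input.splitlines():
--         words = line.split()
--         ws = sorted(words)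
--         if all(ws[i] != ws[i + 1] for i in range(len(ws) - 1)):
--             c1 += 1
--         ns = sorted(''.join(sorted(w)) for w in words)
--         if all(ns[i] != ns[i + 1] for i in range(len(ns) - 1)):
--             c2 += 1
--     return [c1, c2]
-- ===== Notes on version B (the rewrite author's own statement) =====
-- stated objective: alternative
-- what changed: Duplicate/anagram detection by sorting each line's word list (and the list of sorted-letter forms) and scanning adjacent pairs, in a single pass over the lines maintaining both counters, instead of A's two passes building a set per line and comparing lengths.
import Mathlib
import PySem

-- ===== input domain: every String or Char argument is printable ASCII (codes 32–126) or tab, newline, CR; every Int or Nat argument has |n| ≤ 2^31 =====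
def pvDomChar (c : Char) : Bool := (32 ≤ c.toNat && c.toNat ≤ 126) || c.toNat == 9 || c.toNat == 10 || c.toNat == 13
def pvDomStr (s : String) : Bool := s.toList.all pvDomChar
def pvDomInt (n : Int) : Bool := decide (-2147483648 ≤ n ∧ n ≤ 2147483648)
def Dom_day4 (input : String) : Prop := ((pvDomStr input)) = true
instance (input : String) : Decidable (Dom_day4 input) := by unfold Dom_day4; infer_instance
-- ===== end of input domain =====

-- B sorts each line's word list (and sorted-letter forms) and scans adjacent pairs in one
-- pass over the lines, instead of A's per-line set construction over two passes (alternative).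

-- ===== PORT A =====
def pvValid1 (l : String) : Bool :=
  let spl := PySem.Str.split₀ l
  spl.length == (PySem.Set.ofList spl).length

def pvValid2 (l : String) : Bool :=
  let spl := PySem.Str.split₀ l
  spl.length == (PySem.Set.ofList (spl.map (fun w => PySem.List.sorted w.toList (fun c => c) false))).length

def day4 (input : String) : List Int :=
  [(PySem.Str.splitlines input).foldl (fun acc l => acc + (if pvValid1 l then (1 : Int) else 0)) 0,
   (PySem.Str.splitlines input).foldl (fun acc l => acc + (if pvValid2 l then (1 : Int) else 0)) 0]

-- ===== PORT B =====
-- port of Source B's adjacent-pair scan 'all(ws[i] != ws[i+1] for i in range(len(ws)-1))'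
def pvNoAdjDup : List String → Bool
  | a :: b :: t => a != b && pvNoAdjDup (b :: t)
  | _ => true

def day4_alt (input : String) : List Int :=
  let p := (PySem.Str.splitlines input).foldl (fun (acc : Int × Int) line =>
      let words := PySem.Str.split₀ line
      let ws := PySem.List.sorted words (fun x => x) false
      let c1 := if pvNoAdjDup ws then acc.1 + 1 else acc.1
      let ns := PySem.List.sorted
        (words.map (fun w => String.ofList (PySem.List.sorted w.toList (fun c => c) false)))
        (fun x => x) false
      let c2 := if pvNoAdjDup ns then acc.2 + 1 else acc.2
      (c1, c2)) (0, 0)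
  [p.1, p.2]

-- ===== PRECONDITION & SPEC =====
def Spec_day4 (input : String) (out : List Int) : Prop := out = day4_alt input
instance (input : String) (out : List Int) : Decidable (Spec_day4 input out) := by unfold Spec_day4; infer_instance

-- ===== CLAIM (what is proved, stated in full; the proofs are below) =====
def Claim_equal_day4 : Prop := ∀ (input : String), Dom_day4 input → Spec_day4 input (day4 input)

-- ===== LEMMAS AND PROOFS =====

-- set(xs) is a sublist of xs
lemma pv_ofList_sublist {α : Type} [BEq α] [LawfulBEq α] (xs : List α) :
    (PySem.Set.ofList xs).Sublist xs := by
  induction xs with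
  | nil => simp [PySem.Set.ofList]
  | cons x xs ih =>
    rw [PySem.Set.ofList_cons]
    refine List.Sublist.cons₂ x (List.Sublist.trans ?_ ih)
    simp [PySem.Set.discard]

-- len(xs) == len(set(xs)) iff xs has no duplicates
lemma pv_lenA_iff {α : Type} [BEq α] [LawfulBEq α] (xs : List α) :
    (xs.length == (PySem.Set.ofList xs).length) = true ↔ xs.Nodup := by
  rw [beq_iff_eq]
  constructor
  · intro h
    have := (pv_ofList_sublist xs).eq_of_length h.symm
    simpa [this] using PySem.Set.nodup_ofList (xs := xs)
  · intro h; rw [PySem.Set.ofList_eq_self_of_nodup xs h]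

-- adjacent scan on a (≤)-sorted list detects exactly duplicates
lemma pv_noAdjDup_iff (l : List String) (h : l.Pairwise (· ≤ ·)) :
    pvNoAdjDup l = true ↔ l.Nodup := by
  induction l with
  | nil => simp [pvNoAdjDup]
  | cons a t ih =>
    rcases t with _ | ⟨b, t'⟩
    · simp [pvNoAdjDup]
    · obtain ⟨hall, hpt⟩ := List.pairwise_cons.mp h
      have hab : a ≤ b := hall b List.mem_cons_self
      have hbt' : ∀ c ∈ t', b ≤ c := (List.pairwise_cons.mp hpt).1
      have hrest := ih hpt
      have hstep : pvNoAdjDup (a :: b :: t') = ((a != b) && pvNoAdjDup (b :: t')) := rfl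
      constructor
      · intro hs
        rw [hstep, Bool.and_eq_true, bne_iff_ne] at hs
        have hnd := hrest.mp hs.2
        have halt : a < b := lt_of_le_of_ne hab hs.1
        refine List.nodup_cons.mpr ⟨?_, hnd⟩
        intro hmem
        rcases List.mem_cons.mp hmem with rfl | hm
        · exact lt_irrefl a halt
        · exact absurd (hbt' a hm) (not_le_of_gt halt)
      · intro hn
        obtain ⟨hnm, hnd⟩ := List.nodup_cons.mp hn
        rw [hstep, Bool.and_eq_true, bne_iff_ne]
        exact ⟨fun hE => hnm (hE ▸ List.mem_cons_self), hrest.mpr hnd⟩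

-- B's scan over the sorted list computes "no duplicates"
lemma pv_scan_eq_nodup (xs : List String) :
    pvNoAdjDup (PySem.List.sorted xs (fun x => x) false) = true ↔ xs.Nodup := by
  rw [pv_noAdjDup_iff _ (PySem.List.sorted_pairwise xs (fun x => x))]
  exact (PySem.List.sorted_perm xs (fun x => x) false).nodup_iff

lemma pv_ofList_injective : Function.Injective String.ofList := by
  intro a b h
  simpa using congrArg String.toList h

lemma pv_valid1_eq (l : String) :
    pvValid1 l = pvNoAdjDup (PySem.List.sorted (PySem.Str.split₀ l) (fun x => x) false) := by
  rw [Bool.eq_iff_iff]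
  exact (pv_lenA_iff (PySem.Str.split₀ l)).trans (pv_scan_eq_nodup (PySem.Str.split₀ l)).symm

lemma pv_valid2_eq (l : String) :
    pvValid2 l = pvNoAdjDup (PySem.List.sorted
      ((PySem.Str.split₀ l).map (fun w => String.ofList (PySem.List.sorted w.toList (fun c => c) false)))
      (fun x => x) false) := by
  set spl := PySem.Str.split₀ l with hspl
  set k : String → List Char := fun w => PySem.List.sorted w.toList (fun c => c) false with hk
  have hmap : spl.map (fun w => String.ofList (k w)) = (spl.map k).map String.ofList := by
    simp [List.map_map, Function.comp]
  rw [Bool.eq_iff_iff]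
  have h1 : pvValid2 l = true ↔ (spl.map k).Nodup := by
    simp only [pvValid2, ← hspl, ← hk]
    rw [show spl.length = (spl.map k).length by simp]
    exact pv_lenA_iff (spl.map k)
  have h2 : pvNoAdjDup (PySem.List.sorted (spl.map (fun w => String.ofList (k w))) (fun x => x) false) = true
      ↔ (spl.map k).Nodup := by
    rw [pv_scan_eq_nodup, hmap]
    exact List.nodup_map_iff pv_ofList_injective
  exact h1.trans h2.symm

-- split the paired fold of B into two independent folds
lemma pv_pair_foldl (ls : List String) (f g : String → Bool) (c1 c2 : Int) :
    ls.foldl (fun (acc : Int × Int) line =>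
        (if f line then acc.1 + 1 else acc.1, if g line then acc.2 + 1 else acc.2)) (c1, c2)
      = (ls.foldl (fun a l => if f l then a + 1 else a) c1,
         ls.foldl (fun a l => if g l then a + 1 else a) c2) := by
  induction ls generalizing c1 c2 with
  | nil => rfl
  | cons x t ih =>
    simp only [List.foldl_cons]
    split_ifs <;> exact ih _ _

-- ===== VERDICT (by name: the statement is the Claim_ definition above) =====
theorem day4_spec : Claim_equal_day4 := by
  intro input _
  unfold Spec_day4 day4 day4_alt
  simp only [pv_pair_foldl]
  have e1 : (fun (acc : Int) l => acc + (if pvValid1 l then (1 : Int) else 0))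
      = fun (a : Int) l => if pvNoAdjDup (PySem.List.sorted (PySem.Str.split₀ l) (fun x => x) false) then a + 1 else a := by
    funext acc l
    rw [← pv_valid1_eq]
    by_cases h : pvValid1 l <;> simp [h]
  have e2 : (fun (acc : Int) l => acc + (if pvValid2 l then (1 : Int) else 0))
      = fun (a : Int) l => if pvNoAdjDup (PySem.List.sorted ((PySem.Str.split₀ l).map (fun w => String.ofList (PySem.List.sorted w.toList (fun c => c) false))) (fun x => x) false) then a + 1 else a := by
    funext acc l
    rw [← pv_valid2_eq]
    by_cases h : pvValid2 l <;> simp [h]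
  rw [e1, e2]
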